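-- pv_equiv track=rewrite | github.com/juns0720/baekjoon | 백준/Gold/1701. Cubeditor/Cubeditor.py | make_pi
-- ===== SOURCE A (Python) =====
-- def make_pi(s):
--     n = len(s)
--     pi = [0 for _ in range(n)]
--     j = 0
--     cnt = 0
--     for i in range(1,n):
--         while j > 0 and (s[i] != s[j]):
--             j = pi[j-1]
--         if s[i] == s[j]:
--             j += 1
--             cnt = max(cnt, j)
--             pi[i] = j
--     return cnt
-- ===== SOURCE B (Python) =====
-- def make_pi(s):
--     n = len(s)
--     z = [0] * n
--     l = r = 0
--     best = 0
--     for i in range(1, n):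
--         if i < r:
--             k = min(z[i - l], r - i)
--         else:
--             k = 0
--         while i + k < n and s[k] == s[i + k]:
--             k += 1
--         z[i] = k
--         if i + k > r:
--             l, r = i, i + k
--         if k > best:
--             best = k
--     return best
-- ===== Notes on version B (the rewrite author's own statement) =====
-- stated objective: alternative
-- what changed: Replaces the KMP prefix-function loop (failure-link fallbacks pi[j-1], running max of pi) with the Z-algorithm: a [l,r) match window, mirror initialisation z[i]=min(z[i-l],r-i), direct extension, and the running max of z; max(pi) equals max(z) because both are the longest prefix of s that reoccurs elsewhere in s.
import Mathlib
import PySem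

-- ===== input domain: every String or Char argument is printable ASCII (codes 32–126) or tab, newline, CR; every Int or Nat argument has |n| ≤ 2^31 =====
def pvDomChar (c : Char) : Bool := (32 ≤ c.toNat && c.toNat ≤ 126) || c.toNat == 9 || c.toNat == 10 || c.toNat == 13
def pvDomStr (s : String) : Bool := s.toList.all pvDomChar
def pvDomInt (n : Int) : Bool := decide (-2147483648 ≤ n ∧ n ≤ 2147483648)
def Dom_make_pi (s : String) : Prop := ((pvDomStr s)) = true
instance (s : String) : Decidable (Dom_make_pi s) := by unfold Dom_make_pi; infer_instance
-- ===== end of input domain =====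

-- B replaces A's KMP prefix-function scan (failure links pi[j-1], running max of pi) by the
-- Z-algorithm (match window [l,r), mirror initialisation, direct extension, running max of z):
-- a different algorithm of the same cost; max(pi) = max(z) since both are the length of the
-- longest prefix of s that occurs again elsewhere in s.


-- ===== PORT A =====
-- Every subscript A performs is in range on every input (i ∈ [1,n), 0 ≤ j ≤ i < n,
-- 0 ≤ j-1 < n), so s[x] / pi[x] are ported as List.getD with a default that is never read.
-- A's 'while j > 0 and s[i] != s[j]: j = pi[j-1]' is ported with fuel = the entry value of j:
-- each pass strictly decreases j (pi[j-1] = mB cs j < j, proved in kmpSkip_spec below),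
-- so j passes always suffice and the port computes exactly what the Python loop computes.
def kmpSkip (cs : List Char) (pi : List Nat) (i : Nat) : Nat → Nat → Nat
  | 0, j => j
  | fuel+1, j =>
    if 0 < j ∧ cs.getD i ' ' ≠ cs.getD j ' ' then
      kmpSkip cs pi i fuel (pi.getD (j-1) 0)
    else j

-- one iteration of A's 'for i in range(1,n)' body; state = (pi, j, cnt)
def kmpStep (cs : List Char) (st : List Nat × Nat × Nat) (i : Nat) : List Nat × Nat × Nat :=
  let j := kmpSkip cs st.1 i st.2.1 st.2.1
  if cs.getD i ' ' = cs.getD j ' ' then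
    (st.1.set i (j+1), j+1, max st.2.2 (j+1))
  else (st.1, j, st.2.2)

def make_pi (s : String) : Int :=
  let cs := s.toList
  let res := (List.range' 1 (cs.length - 1)).foldl (kmpStep cs) (List.replicate cs.length 0, 0, 0)
  (res.2.2 : Int)

-- ===== PORT B =====
-- B's 'while i + k < n and s[k] == s[i + k]: k += 1' (indices in range by the guard)
def zExtend (cs : List Char) (i : Nat) (k : Nat) : Nat :=
  if h : i + k < cs.length ∧ cs.getD k ' ' = cs.getD (i+k) ' ' then zExtend cs i (k+1) else k
termination_by cs.length - (i + k)
decreasing_by have := h.1; omega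

-- one iteration of B's 'for i in range(1,n)' body; state = (z, l, r, best)
def zStep (cs : List Char) (st : List Nat × Nat × Nat × Nat) (i : Nat) : List Nat × Nat × Nat × Nat :=
  let k0 := if i < st.2.2.1 then min (st.1.getD (i - st.2.1) 0) (st.2.2.1 - i) else 0
  let k := zExtend cs i k0
  let lr := if st.2.2.1 < i + k then (i, i + k) else (st.2.1, st.2.2.1)
  (st.1.set i k, lr.1, lr.2, max st.2.2.2 k)

def make_pi_alt (s : String) : Int :=
  let cs := s.toList
  let res := (List.range' 1 (cs.length - 1)).foldl (zStep cs) (List.replicate cs.length 0, 0, 0, 0)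
  (res.2.2.2 : Int)

-- ===== PRECONDITION & SPEC =====
def Spec_make_pi (s : String) (out : Int) : Prop := out = make_pi_alt s
instance (s : String) (out : Int) : Decidable (Spec_make_pi s out) := by unfold Spec_make_pi; infer_instance

-- ===== CLAIM (what is proved, stated in full; the proofs are below) =====
def Claim_equal_make_pi : Prop := ∀ (s : String), Dom_make_pi s → Spec_make_pi s (make_pi s)

-- ===== LEMMAS AND PROOFS =====

-- 'k is a (proper) border of the length-m prefix of cs': the first k chars repeat at its end
def BdP (cs : List Char) (m k : Nat) : Prop :=
  k < m ∧ ∀ t, t < k → cs.getD t ' ' = cs.getD (m - k + t) ' '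

-- mB cs m = longest proper border of the length-m prefix = the value A's pi stores for index m-1
def mB (cs : List Char) (m : Nat) : Nat :=
  Nat.findGreatest (fun k => k < m ∧ ∀ t, t < k → cs.getD t ' ' = cs.getD (m - k + t) ' ') (m - 1)

-- running maximum of mB over prefix lengths 1..m (A's cnt after processing i = m-1 iterations)
def gmax (cs : List Char) : Nat → Nat
  | 0 => 0
  | m+1 => max (gmax cs m) (mB cs (m+1))

-- zs cs j = Z-value at j: length of the longest common prefix of cs and its suffix from j
def zs (cs : List Char) (j : Nat) : Nat :=
  Nat.findGreatest (fun k => j + k ≤ cs.length ∧ ∀ t, t < k → cs.getD t ' ' = cs.getD (j + t) ' ')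
    (cs.length - j)

-- running maximum of zs over 1..m (B's best)
def bmax (cs : List Char) : Nat → Nat
  | 0 => 0
  | m+1 => max (bmax cs m) (zs cs (m+1))

lemma getD_set' (xs : List Nat) (i t v : Nat) :
    (xs.set i v).getD t 0 = if t = i ∧ i < xs.length then v else xs.getD t 0 := by
  simp [List.getD, List.getElem?_set]
  split_ifs <;> simp_all

lemma getD_replicate (n t : Nat) : (List.replicate n (0:Nat)).getD t 0 = 0 := by
  simp [List.getD, List.getElem?_replicate]
  split_ifs <;> rfl

lemma mB_le (cs : List Char) (m : Nat) : mB cs m ≤ m - 1 := Nat.findGreatest_le _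

lemma mB_spec (cs : List Char) (m : Nat) (h : 0 < m) : BdP cs m (mB cs m) := by
  exact Nat.findGreatest_spec (m := 0) (n := m - 1)
      (P := fun k => k < m ∧ ∀ t, t < k → cs.getD t ' ' = cs.getD (m - k + t) ' ')
      (Nat.zero_le _) ⟨h, by omega⟩

lemma mB_is_greatest (cs : List Char) (m k : Nat) (h : BdP cs m k) : k ≤ mB cs m :=
  Nat.le_findGreatest (by have := h.1; omega) h

lemma Bd_succ_iff (cs : List Char) (m k : Nat) :
    BdP cs (m+1) (k+1) ↔ BdP cs m k ∧ cs.getD k ' ' = cs.getD m ' ' := by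
  constructor
  · rintro ⟨hlt, hm⟩
    refine ⟨⟨by omega, fun t ht => ?_⟩, ?_⟩
    · have := hm t (by omega); rwa [show m+1-(k+1)+t = m-k+t by omega] at this
    · have := hm k (by omega); rwa [show m+1-(k+1)+k = m by omega] at this
  · rintro ⟨⟨hkm, hb⟩, hc⟩
    refine ⟨by omega, fun t ht => ?_⟩
    rcases Nat.lt_or_ge t k with h | h
    · have := hb t h; rwa [show m+1-(k+1)+t = m-k+t by omega]
    · have htk : t = k := by omega
      subst htk; rw [show m+1-(t+1)+t = m by omega]; exact hc

lemma Bd_down (cs : List Char) (m k j : Nat) (h1 : BdP cs m k) (h2 : BdP cs m j)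
    (hkj : k < j) : BdP cs j k := by
  obtain ⟨hk, hbk⟩ := h1; obtain ⟨hj, hbj⟩ := h2
  refine ⟨hkj, fun t ht => ?_⟩
  have e1 := hbk t ht
  have e2 := hbj (j - k + t) (by omega)
  rw [show m - j + (j - k + t) = m - k + t by omega] at e2
  rw [e1, ← e2]

lemma Bd_up (cs : List Char) (m k j : Nat) (h1 : BdP cs j k) (h2 : BdP cs m j) : BdP cs m k := by
  obtain ⟨hk, hbk⟩ := h1; obtain ⟨hj, hbj⟩ := h2
  refine ⟨by omega, fun t ht => ?_⟩
  have e1 := hbk t ht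
  have e2 := hbj (j - k + t) (by omega)
  rw [e1, e2, show m - j + (j - k + t) = m - k + t by omega]

lemma kmpSkip_spec (cs : List Char) (pi : List Nat) (i : Nat)
    (hpi : ∀ t, t < i → pi.getD t 0 = mB cs (t+1)) :
    ∀ fuel j, j ≤ fuel → BdP cs i j →
      (∀ k, BdP cs i k → j < k → cs.getD k ' ' ≠ cs.getD i ' ') →
      BdP cs i (kmpSkip cs pi i fuel j) ∧
      (∀ k, BdP cs i k → kmpSkip cs pi i fuel j < k → cs.getD k ' ' ≠ cs.getD i ' ') ∧
      (0 < kmpSkip cs pi i fuel j → cs.getD (kmpSkip cs pi i fuel j) ' ' = cs.getD i ' ') := by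
  intro fuel
  induction fuel with
  | zero =>
    intro j hj hb hmax
    have hj0 : j = 0 := by omega
    subst hj0
    simp only [kmpSkip]
    exact ⟨hb, hmax, by omega⟩
  | succ f ih =>
    intro j hj hb hmax
    simp only [kmpSkip]
    by_cases hcond : 0 < j ∧ cs.getD i ' ' ≠ cs.getD j ' '
    · rw [if_pos hcond]
      have hji : j < i := hb.1
      have hjeq : pi.getD (j-1) 0 = mB cs j := by
        have := hpi (j-1) (by omega)
        rwa [show j-1+1 = j by omega] at this
      have hmle : mB cs j ≤ j - 1 := mB_le cs j
      have hbj' : BdP cs j (mB cs j) := mB_spec cs j hcond.1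
      refine ih (pi.getD (j-1) 0) (by omega) ?_ ?_
      · rw [hjeq]; exact Bd_up cs i (mB cs j) j hbj' hb
      · rw [hjeq]
        intro k hk hlt
        rcases Nat.lt_trichotomy k j with h | h | h
        · exfalso
          have : BdP cs j k := Bd_down cs i k j hk hb h
          have := mB_is_greatest cs j k this
          omega
        · subst h
          exact fun he => hcond.2 he.symm
        · exact hmax k hk h
    · rw [if_neg hcond]
      exact ⟨hb, hmax, fun h0 => (Decidable.of_not_not fun hne => hcond ⟨h0, hne⟩).symm⟩

lemma mB_succ_match (cs : List Char) (i jf : Nat) (h1 : BdP cs i jf)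
    (hc : cs.getD jf ' ' = cs.getD i ' ')
    (hmax : ∀ k, BdP cs i k → jf < k → cs.getD k ' ' ≠ cs.getD i ' ') :
    mB cs (i+1) = jf + 1 := by
  apply le_antisymm
  · rcases Nat.eq_zero_or_pos (mB cs (i+1)) with h0 | h0
    · omega
    · have hb := mB_spec cs (i+1) (by omega)
      obtain ⟨k, hk⟩ : ∃ k, mB cs (i+1) = k + 1 := ⟨mB cs (i+1) - 1, by omega⟩
      rw [hk] at hb
      obtain ⟨hbk, hck⟩ := (Bd_succ_iff cs i k).1 hb
      rcases Nat.lt_or_ge jf k with h | h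
      · exact absurd hck (hmax k hbk h)
      · omega
  · exact mB_is_greatest cs (i+1) (jf+1) ((Bd_succ_iff cs i jf).2 ⟨h1, hc⟩)

lemma mB_succ_nomatch (cs : List Char) (i : Nat)
    (hmax : ∀ k, BdP cs i k → cs.getD k ' ' ≠ cs.getD i ' ') :
    mB cs (i+1) = 0 := by
  by_contra h0
  have hb := mB_spec cs (i+1) (by omega)
  obtain ⟨k, hk⟩ : ∃ k, mB cs (i+1) = k + 1 := ⟨mB cs (i+1) - 1, by omega⟩
  rw [hk] at hb
  obtain ⟨hbk, hck⟩ := (Bd_succ_iff cs i k).1 hb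
  exact hmax k hbk hck

-- invariant of A's fold after processing i = 1 .. m
def InvA (cs : List Char) (m : Nat) (st : List Nat × Nat × Nat) : Prop :=
  st.1.length = cs.length ∧
  (∀ t, t ≤ m → st.1.getD t 0 = mB cs (t+1)) ∧
  (∀ t, m < t → st.1.getD t 0 = 0) ∧
  st.2.1 = mB cs (m+1) ∧
  st.2.2 = gmax cs (m+1)

lemma invA_step (cs : List Char) (m : Nat) (st : List Nat × Nat × Nat)
    (hm : m + 1 ≤ cs.length - 1) (h : InvA cs m st) :
    InvA cs (m+1) (kmpStep cs st (m+1)) := by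
  obtain ⟨hlen, hset, hzero, hj, hcnt⟩ := h
  have hmn : m + 2 ≤ cs.length := by omega
  have hi1 : 0 < m + 1 := by omega
  have hskip := kmpSkip_spec cs st.1 (m+1)
      (fun t ht => hset t (by omega)) st.2.1 st.2.1 le_rfl
      (by rw [hj]; exact mB_spec cs (m+1) hi1)
      (by rw [hj]; intro k hk hlt; exact absurd (mB_is_greatest cs (m+1) k hk) (by omega))
  set jf := kmpSkip cs st.1 (m+1) st.2.1 st.2.1 with hjf
  obtain ⟨hbf, hmaxf, hcf⟩ := hskip
  simp only [kmpStep, ← hjf]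
  by_cases hc : cs.getD (m+1) ' ' = cs.getD jf ' '
  · rw [if_pos hc]
    have hmB : mB cs (m+2) = jf + 1 := mB_succ_match cs (m+1) jf hbf hc.symm hmaxf
    refine ⟨by simpa using hlen, ?_, ?_, by simpa using hmB.symm, ?_⟩
    · intro t ht
      rw [getD_set']
      by_cases he : t = m + 1
      · subst he
        rw [if_pos ⟨rfl, by omega⟩]
        exact hmB.symm
      · rw [if_neg (by tauto)]
        exact hset t (by omega)
    · intro t ht
      rw [getD_set', if_neg (by omega)]
      exact hzero t (by omega)
    · show max st.2.2 (jf+1) = gmax cs (m+2)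
      rw [hcnt, show gmax cs (m+2) = max (gmax cs (m+1)) (mB cs (m+2)) from rfl, hmB]
  · rw [if_neg hc]
    have hjf0 : jf = 0 := by
      by_contra h0
      exact hc ((hcf (by omega)).symm)
    have hmB : mB cs (m+2) = 0 := by
      apply mB_succ_nomatch cs (m+1)
      intro k hk
      rcases Nat.eq_zero_or_pos k with h0 | h0
      · subst h0
        rw [hjf0] at hc
        exact fun he => hc he.symm
      · exact hmaxf k hk (by omega)
    refine ⟨hlen, ?_, ?_, by rw [hjf0, hmB], ?_⟩
    · intro t ht
      rcases Nat.lt_or_ge t (m+1) with h | h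
      · exact hset t (by omega)
      · have : t = m + 1 := by omega
        subst this
        rw [hzero (m+1) (by omega), hmB]
    · intro t ht
      exact hzero t (by omega)
    · show st.2.2 = gmax cs (m+2)
      rw [hcnt, show gmax cs (m+2) = max (gmax cs (m+1)) (mB cs (m+2)) from rfl, hmB]
      simp

lemma invA_all (cs : List Char) :
    ∀ m, m ≤ cs.length - 1 →
      InvA cs m ((List.range' 1 m).foldl (kmpStep cs) (List.replicate cs.length 0, 0, 0)) := by
  intro m
  induction m with
  | zero =>
    intro _
    rw [show List.range' 1 0 = ([]:List Nat) from rfl]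
    simp only [List.foldl_nil]
    refine ⟨by simp, ?_, fun t _ => getD_replicate _ _, ?_, ?_⟩
    · intro t ht
      have ht0 : t = 0 := by omega
      subst ht0
      rw [getD_replicate]
      show (0:Nat) = Nat.findGreatest _ 0
      rw [Nat.findGreatest_zero]
    · show (0:Nat) = mB cs 1
      unfold mB
      rw [Nat.findGreatest_zero]
    · show (0:Nat) = gmax cs 1
      show (0:Nat) = max (gmax cs 0) (mB cs 1)
      unfold mB
      rw [Nat.findGreatest_zero]
      rfl
  | succ m ih =>
    intro hm
    rw [List.range'_concat, List.foldl_append]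
    simp only [List.foldl_cons, List.foldl_nil]
    rw [show 1 + 1 * m = m + 1 by omega]
    exact invA_step cs m _ hm (ih (by omega))

lemma zExtend_spec (cs : List Char) (i : Nat) :
    ∀ d k, cs.length - (i + k) ≤ d → i + k ≤ cs.length →
      (∀ t, t < k → cs.getD t ' ' = cs.getD (i+t) ' ') →
      k ≤ zExtend cs i k ∧ i + zExtend cs i k ≤ cs.length ∧
      (∀ t, t < zExtend cs i k → cs.getD t ' ' = cs.getD (i+t) ' ') ∧
      (i + zExtend cs i k = cs.length ∨
        cs.getD (zExtend cs i k) ' ' ≠ cs.getD (i + zExtend cs i k) ' ') := by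
  intro d
  induction d with
  | zero =>
    intro k hd hk hm
    have hik : i + k = cs.length := by omega
    rw [zExtend, dif_neg (by rintro ⟨h1, _⟩; omega)]
    exact ⟨le_rfl, hk, hm, Or.inl hik⟩
  | succ d ih =>
    intro k hd hk hm
    rw [zExtend]
    by_cases hcond : i + k < cs.length ∧ cs.getD k ' ' = cs.getD (i+k) ' '
    · rw [dif_pos hcond]
      have hrec := ih (k+1) (by omega) (by omega) (fun t ht => by
        rcases Nat.lt_or_ge t k with h | h
        · exact hm t h
        · have : t = k := by omega
          subst this
          exact hcond.2)
      exact ⟨le_trans (by omega) hrec.1, hrec.2.1, hrec.2.2.1, hrec.2.2.2⟩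
    · rw [dif_neg hcond]
      refine ⟨le_rfl, hk, hm, ?_⟩
      rcases Nat.lt_or_ge (i+k) cs.length with h | h
      · exact Or.inr fun he => hcond ⟨h, he⟩
      · exact Or.inl (by omega)

lemma zs_spec (cs : List Char) (j : Nat) (h : j ≤ cs.length) :
    j + zs cs j ≤ cs.length ∧ ∀ t, t < zs cs j → cs.getD t ' ' = cs.getD (j+t) ' ' := by
  exact Nat.findGreatest_spec (m := 0) (n := cs.length - j)
      (P := fun k => j + k ≤ cs.length ∧ ∀ t, t < k → cs.getD t ' ' = cs.getD (j + t) ' ')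
      (Nat.zero_le _) ⟨by omega, by omega⟩

lemma zs_is_greatest (cs : List Char) (j k : Nat) (hk : j + k ≤ cs.length)
    (hm : ∀ t, t < k → cs.getD t ' ' = cs.getD (j+t) ' ') : k ≤ zs cs j :=
  Nat.le_findGreatest (by omega) ⟨hk, hm⟩

lemma zs_char (cs : List Char) (j k : Nat) (hj : j ≤ cs.length) (hk : j + k ≤ cs.length)
    (hm : ∀ t, t < k → cs.getD t ' ' = cs.getD (j+t) ' ')
    (hstop : j + k = cs.length ∨ cs.getD k ' ' ≠ cs.getD (j+k) ' ') : zs cs j = k := by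
  apply le_antisymm
  · by_contra hgt
    have hgt2 : k < zs cs j := Nat.lt_of_not_le hgt
    obtain ⟨hbound, hmatch⟩ := zs_spec cs j hj
    have h1 := hmatch k hgt2
    have h2 : j + k < cs.length := by omega
    rcases hstop with h | h
    · omega
    · exact h h1
  · exact zs_is_greatest cs j k hk hm

-- invariant of B's fold after processing i = 1 .. m; state = (z, l, r, best)
def InvB (cs : List Char) (m : Nat) (st : List Nat × Nat × Nat × Nat) : Prop :=
  st.1.length = cs.length ∧
  (∀ t, 1 ≤ t → t ≤ m → st.1.getD t 0 = zs cs t) ∧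
  (∀ t, (t = 0 ∨ m < t) → st.1.getD t 0 = 0) ∧
  st.2.1 ≤ m ∧ st.2.1 ≤ st.2.2.1 ∧ st.2.2.1 ≤ cs.length ∧
  (∀ u, u < st.2.2.1 - st.2.1 → cs.getD u ' ' = cs.getD (st.2.1 + u) ' ') ∧
  st.2.2.2 = bmax cs m

lemma invB_step (cs : List Char) (m : Nat) (st : List Nat × Nat × Nat × Nat)
    (hm : m + 1 ≤ cs.length - 1) (h : InvB cs m st) :
    InvB cs (m+1) (zStep cs st (m+1)) := by
  obtain ⟨hlen, hset, hzero, hlm, hlr, hrn, hwin, hbest⟩ := h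
  have hmn : m + 2 ≤ cs.length := by omega
  simp only [zStep]
  set k0 := (if m+1 < st.2.2.1 then min (st.1.getD (m+1 - st.2.1) 0) (st.2.2.1 - (m+1)) else 0)
    with hk0def
  have hk0r : k0 ≤ st.2.2.1 - (m+1) ∨ k0 = 0 := by
    rw [hk0def]
    split_ifs
    · exact Or.inl (min_le_right _ _)
    · exact Or.inr rfl
  have hk0n : m+1 + k0 ≤ cs.length := by rcases hk0r with h | h <;> omega
  have hk0m : ∀ t, t < k0 → cs.getD t ' ' = cs.getD (m+1+t) ' ' := by
    intro t ht
    rw [hk0def] at ht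
    by_cases hir : m+1 < st.2.2.1
    · rw [if_pos hir] at ht
      have htv : t < st.1.getD (m+1 - st.2.1) 0 := lt_of_lt_of_le ht (min_le_left _ _)
      have htr : t < st.2.2.1 - (m+1) := lt_of_lt_of_le ht (min_le_right _ _)
      by_cases hl0 : st.2.1 = 0
      · exfalso
        rw [hl0, Nat.sub_zero, hzero (m+1) (Or.inr (by omega))] at htv
        omega
      · have hzv : st.1.getD (m+1 - st.2.1) 0 = zs cs (m+1 - st.2.1) :=
          hset _ (by omega) (by omega)
        rw [hzv] at htv
        have hspec := zs_spec cs (m+1 - st.2.1) (by omega)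
        have e1 := hspec.2 t htv
        have e2 := hwin ((m+1 - st.2.1) + t) (by omega)
        rw [e1, e2, show st.2.1 + (m+1 - st.2.1 + t) = m+1+t by omega]
    · rw [if_neg hir] at ht
      omega
  have hext := zExtend_spec cs (m+1) cs.length k0 (by omega) hk0n hk0m
  obtain ⟨hk0le, hkn, hkm, hkstop⟩ := hext
  have hzi : zs cs (m+1) = zExtend cs (m+1) k0 := zs_char cs (m+1) _ (by omega) hkn hkm hkstop
  set kk := zExtend cs (m+1) k0 with hkkdef
  have hz2 : ∀ t, 1 ≤ t → t ≤ m+1 → (st.1.set (m+1) kk).getD t 0 = zs cs t := by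
    intro t h1 h2
    rw [getD_set']
    by_cases he : t = m + 1
    · subst he
      rw [if_pos ⟨rfl, by omega⟩]
      exact hzi.symm
    · rw [if_neg (by tauto)]
      exact hset t h1 (by omega)
  have hz3 : ∀ t, (t = 0 ∨ m+1 < t) → (st.1.set (m+1) kk).getD t 0 = 0 := by
    intro t ht
    rw [getD_set', if_neg (by omega)]
    exact hzero t (by omega)
  by_cases hbig : st.2.2.1 < m+1 + kk
  · rw [if_pos hbig]
    dsimp only [InvB]
    refine ⟨by simpa using hlen, hz2, hz3, le_rfl, by omega, hkn, ?_, ?_⟩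
    · intro u hu
      exact hkm u (by omega)
    · show max st.2.2.2 kk = bmax cs (m+1)
      rw [hbest, show bmax cs (m+1) = max (bmax cs m) (zs cs (m+1)) from rfl, hzi]
  · rw [if_neg hbig]
    dsimp only [InvB]
    refine ⟨by simpa using hlen, hz2, hz3, by omega, hlr, hrn, hwin, ?_⟩
    show max st.2.2.2 kk = bmax cs (m+1)
    rw [hbest, show bmax cs (m+1) = max (bmax cs m) (zs cs (m+1)) from rfl, hzi]

lemma invB_all (cs : List Char) :
    ∀ m, m ≤ cs.length - 1 →
      InvB cs m ((List.range' 1 m).foldl (zStep cs) (List.replicate cs.length 0, 0, 0, 0)) := by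
  intro m
  induction m with
  | zero =>
    intro _
    rw [show List.range' 1 0 = ([]:List Nat) from rfl]
    simp only [List.foldl_nil]
    dsimp only [InvB]
    exact ⟨by simp, fun t h1 h2 => by omega, fun t _ => getD_replicate _ _,
      le_rfl, le_rfl, Nat.zero_le _, fun u hu => by omega, rfl⟩
  | succ m ih =>
    intro hm
    rw [List.range'_concat, List.foldl_append]
    simp only [List.foldl_cons, List.foldl_nil]
    rw [show 1 + 1 * m = m + 1 by omega]
    exact invB_step cs m _ hm (ih (by omega))

lemma gmax_le (cs : List Char) (X : Nat) :
    ∀ m, (∀ q, 1 ≤ q → q ≤ m → mB cs q ≤ X) → gmax cs m ≤ X := by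
  intro m
  induction m with
  | zero => intro _; simp [gmax]
  | succ m ih =>
    intro h
    simp only [gmax, max_le_iff]
    exact ⟨ih (fun q h1 h2 => h q h1 (by omega)), h (m+1) (by omega) le_rfl⟩

lemma le_gmax (cs : List Char) : ∀ m q, 1 ≤ q → q ≤ m → mB cs q ≤ gmax cs m := by
  intro m
  induction m with
  | zero => intro q h1 h2; omega
  | succ m ih =>
    intro q h1 h2
    rcases Nat.lt_or_ge q (m+1) with h | h
    · exact le_trans (ih q h1 (by omega)) (le_max_left _ _)
    · have : q = m + 1 := by omega
      subst this; exact le_max_right _ _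

lemma bmax_le (cs : List Char) (X : Nat) :
    ∀ m, (∀ q, 1 ≤ q → q ≤ m → zs cs q ≤ X) → bmax cs m ≤ X := by
  intro m
  induction m with
  | zero => intro _; simp [bmax]
  | succ m ih =>
    intro h
    simp only [bmax, max_le_iff]
    exact ⟨ih (fun q h1 h2 => h q h1 (by omega)), h (m+1) (by omega) le_rfl⟩

lemma le_bmax (cs : List Char) : ∀ m q, 1 ≤ q → q ≤ m → zs cs q ≤ bmax cs m := by
  intro m
  induction m with
  | zero => intro q h1 h2; omega
  | succ m ih =>
    intro q h1 h2
    rcases Nat.lt_or_ge q (m+1) with h | h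
    · exact le_trans (ih q h1 (by omega)) (le_max_left _ _)
    · have : q = m + 1 := by omega
      subst this; exact le_max_right _ _

lemma mB_le_bmax (cs : List Char) (q : Nat) (h1 : q ≤ cs.length) :
    mB cs q ≤ bmax cs (cs.length - 1) := by
  rcases Nat.eq_zero_or_pos q with hq0 | hq0
  · subst hq0
    unfold mB
    rw [Nat.findGreatest_zero]
    exact Nat.zero_le _
  · obtain ⟨hkq, hmatch⟩ := mB_spec cs q hq0
    rcases Nat.eq_zero_or_pos (mB cs q) with h0 | h0
    · rw [h0]; exact Nat.zero_le _
    · have hzge : mB cs q ≤ zs cs (q - mB cs q) :=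
        zs_is_greatest cs (q - mB cs q) (mB cs q) (by omega) (fun t ht => hmatch t ht)
      have hle : zs cs (q - mB cs q) ≤ bmax cs (cs.length - 1) :=
        le_bmax cs _ _ (by omega) (by omega)
      omega

lemma zs_le_gmax (cs : List Char) (j : Nat) (h1 : 1 ≤ j) (h2 : j ≤ cs.length - 1) :
    zs cs j ≤ gmax cs cs.length := by
  obtain ⟨hbound, hmatch⟩ := zs_spec cs j (by omega)
  rcases Nat.eq_zero_or_pos (zs cs j) with h0 | h0
  · rw [h0]; exact Nat.zero_le _
  · have hbd : BdP cs (j + zs cs j) (zs cs j) := by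
      refine ⟨by omega, fun t ht => ?_⟩
      have := hmatch t ht
      rwa [show j + zs cs j - zs cs j + t = j + t by omega]
    have hmb : zs cs j ≤ mB cs (j + zs cs j) := mB_is_greatest cs _ _ hbd
    have hgm : mB cs (j + zs cs j) ≤ gmax cs cs.length := le_gmax cs _ _ (by omega) (by omega)
    omega

lemma main_eq (cs : List Char) :
    gmax cs cs.length = bmax cs (cs.length - 1) := by
  apply le_antisymm
  · exact gmax_le cs _ _ (fun q _ h2 => mB_le_bmax cs q h2)
  · exact bmax_le cs _ _ (fun q hq1 hq2 => zs_le_gmax cs q hq1 hq2)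

-- ===== VERDICT (by name: the statement is the Claim_ definition above) =====
theorem make_pi_spec : Claim_equal_make_pi := by
  unfold Claim_equal_make_pi
  intro s _
  unfold Spec_make_pi
  simp only [make_pi, make_pi_alt]
  rcases Nat.eq_zero_or_pos s.toList.length with hn | hn
  · rw [hn]
    rfl
  · have hA := (invA_all s.toList (s.toList.length - 1) le_rfl).2.2.2.2
    have hB := (invB_all s.toList (s.toList.length - 1) le_rfl).2.2.2.2.2.2.2
    rw [show s.toList.length - 1 + 1 = s.toList.length by omega] at hA
    rw [hA, hB, main_eq s.toList]
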